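-- pv_equiv track=rewrite | github.com/meintechblog/awtrix-display-bridge | bridge/mqtt_bridge.py | _topic_matches_filter
-- ===== SOURCE A (Python) =====
-- def _topic_matches_filter(topic: str, topic_filter: str) -> bool:
--     if not topic_filter:
--         return False
--
--     topic_levels = topic.split('/')
--     filter_levels = topic_filter.split('/')
--
--     i = 0
--     while i < len(filter_levels):
--         level = filter_levels[i]
--         if level == '#':
--             return i == len(filter_levels) - 1
--         if i >= len(topic_levels):
--             return False
--         if level != '+' and level != topic_levels[i]:
--             return False
--         i += 1
--
--     return i == len(topic_levels)
-- ===== SOURCE B (Python) =====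
-- def _topic_matches_filter(topic: str, topic_filter: str) -> bool:
--     if not topic_filter:
--         return False
--
--     def match(f_levels, t_levels):
--         if not f_levels:
--             return not t_levels
--         if f_levels[0] == '#':
--             return len(f_levels) == 1
--         if not t_levels:
--             return False
--         return (f_levels[0] == '+' or f_levels[0] == t_levels[0]) and \
--             match(f_levels[1:], t_levels[1:])
--
--     return match(topic_filter.split('/'), topic.split('/'))
-- ===== Notes on version B (the rewrite author's own statement) =====
-- stated objective: alternative
-- what changed: Replaced the index-threaded while loop with early returns by a recursive matcher on the two level lists that destructures and recurses on real tails.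
import Mathlib
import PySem

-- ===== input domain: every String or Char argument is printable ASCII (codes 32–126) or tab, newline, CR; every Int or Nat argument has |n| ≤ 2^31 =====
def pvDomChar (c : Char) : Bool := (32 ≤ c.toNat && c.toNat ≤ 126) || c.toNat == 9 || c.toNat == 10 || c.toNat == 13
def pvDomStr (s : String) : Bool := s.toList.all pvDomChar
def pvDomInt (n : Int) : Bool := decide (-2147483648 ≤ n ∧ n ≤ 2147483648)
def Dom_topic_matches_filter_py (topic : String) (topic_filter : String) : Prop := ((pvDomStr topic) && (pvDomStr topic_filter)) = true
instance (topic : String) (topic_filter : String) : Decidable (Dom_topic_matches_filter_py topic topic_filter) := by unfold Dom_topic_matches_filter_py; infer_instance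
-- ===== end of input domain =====

-- B replaces A's index-threaded while loop by a recursive matcher on the level-list tails (alternative decomposition, same cost class).

-- ===== PORT A =====
-- A's while loop over index i, with the same early returns in the same order.
def pvLoopA (fl tl : List String) (i : Nat) : Bool :=
  if h : i < fl.length then
    let level := fl[i]
    if level == "#" then decide (i = fl.length - 1)
    else if tl.length ≤ i then false
    else if level ≠ "+" ∧ level ≠ tl.getD i "" then false
    else pvLoopA fl tl (i + 1)
  else decide (i = tl.length)
termination_by fl.length - i

def topic_matches_filter_py (topic : String) (topic_filter : String) : Bool :=
  if topic_filter = "" then false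
  else pvLoopA (((PySem.Str.split? topic_filter "/").getD [])) (((PySem.Str.split? topic "/").getD [])) 0

-- ===== PORT B =====
-- B's recursive helper match(f_levels, t_levels), recursing on list tails.
def pvMatchB : List String → List String → Bool
  | [], tl => tl.isEmpty
  | f :: fs, tl =>
    if f == "#" then fs.isEmpty
    else match tl with
      | [] => false
      | t :: ts => (f == "+" || f == t) && pvMatchB fs ts

def topic_matches_filter_py_alt (topic : String) (topic_filter : String) : Bool :=
  if topic_filter = "" then false
  else pvMatchB (((PySem.Str.split? topic_filter "/").getD [])) (((PySem.Str.split? topic "/").getD []))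

-- ===== PRECONDITION & SPEC =====
def Spec_topic_matches_filter_py (topic : String) (topic_filter : String) (out : Bool) : Prop := out = topic_matches_filter_py_alt topic topic_filter
instance (topic : String) (topic_filter : String) (out : Bool) : Decidable (Spec_topic_matches_filter_py topic topic_filter out) := by unfold Spec_topic_matches_filter_py; infer_instance

-- ===== CLAIM (what is proved, stated in full; the proofs are below) =====
def Claim_equal_topic_matches_filter_py : Prop := ∀ (topic : String) (topic_filter : String), Dom_topic_matches_filter_py topic topic_filter → Spec_topic_matches_filter_py topic topic_filter (topic_matches_filter_py topic topic_filter)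

-- ===== LEMMAS AND PROOFS =====
theorem pvLoop_eq_match (fl tl : List String) (i : Nat) (hi : i ≤ tl.length) :
    pvLoopA fl tl i = pvMatchB (fl.drop i) (tl.drop i) := by
  by_cases h : i < fl.length
  · have hdf : fl.drop i = fl[i] :: fl.drop (i + 1) := List.drop_eq_getElem_cons h
    rw [pvLoopA]
    simp only [h, dif_pos, hdf, pvMatchB]
    by_cases hhash : fl[i] = "#"
    · simp only [hhash, beq_self_eq_true, if_pos]
      have : (fl.drop (i + 1)).isEmpty = decide (i = fl.length - 1) := by
        rw [Bool.eq_iff_iff]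
        simp only [List.isEmpty_iff, List.drop_eq_nil_iff, decide_eq_true_eq]
        omega
      simp [this]
    · simp only [beq_iff_eq, hhash, if_neg, not_false_iff]
      by_cases hlen : tl.length ≤ i
      · have htl : tl.drop i = [] := List.drop_eq_nil_iff.mpr hlen
        simp [hlen, htl]
      · have hlt : i < tl.length := by omega
        have hdt : tl.drop i = tl[i] :: tl.drop (i + 1) := List.drop_eq_getElem_cons hlt
        have hgd : tl.getD i "" = tl[i] := by simp [List.getD, hlt]
        by_cases hskip : fl[i] ≠ "+" ∧ fl[i] ≠ tl.getD i ""
        · simp only [hlen, if_pos hskip, hdt]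
          rcases hskip with ⟨h1, h2⟩
          rw [hgd] at h2
          simp [h1, h2]
        · have hrec := pvLoop_eq_match fl tl (i + 1) (by omega)
          simp only [hlen, if_neg hskip, hrec, hdt]
          rw [not_and_or, not_not, not_not] at hskip
          by_cases h1 : fl[i] = "+"
          · simp [h1]
          · have h2 := hskip.resolve_left h1
            rw [hgd] at h2
            simp [h2]
  · have hdf : fl.drop i = [] := List.drop_eq_nil_iff.mpr (by omega)
    rw [pvLoopA]
    simp only [h, dif_neg, not_false_iff, hdf, pvMatchB]
    rw [Bool.eq_iff_iff]
    simp only [List.isEmpty_iff, List.drop_eq_nil_iff, decide_eq_true_eq]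
    omega
termination_by fl.length - i

-- ===== VERDICT (by name: the statement is the Claim_ definition above) =====
theorem topic_matches_filter_py_spec : Claim_equal_topic_matches_filter_py := by
  intro topic topic_filter _
  unfold Spec_topic_matches_filter_py topic_matches_filter_py topic_matches_filter_py_alt
  by_cases hf : topic_filter = ""
  · simp [hf]
  · simp only [hf, if_neg, not_false_iff]
    exact pvLoop_eq_match _ _ 0 (Nat.zero_le _)
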